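-- pv_equiv track=rewrite | github.com/uni-kakurenbo/cp-solutions | realtime/MojaCoder/MMA012/10.py | solve
-- ===== SOURCE A (Python) =====
-- from itertools import product
-- from functools import reduce
-- from collections import defaultdict
--
-- MOD = 998244353
--
-- def solve(x):
--     v = str(x)
--     n = len(v)
--     dp = defaultdict(int)
--     dp[0, 0, 0, 0, 0] = 1
--
--     for i, less, has2, has7, total in product(range(n), (0, 1), (0, 1), (0, 1), range(74)):
--         max_d = 9 if less else int(v[i])
--         for d in range(max_d+1):
--             less_ = less or d < max_d
--             has2_ = has2 or d == 2
--             has7_ = has7 or d == 7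
--             total_ = min(73, total + d)
--             dp[i+1, less_, has2_, has7_, total_] += dp[i, less, has2, has7, total]
--             dp[i+1, less_, has2_, has7_, total_] %= MOD
--
--     criteria = ((n, less, has2, has7, total) for less, has2, has7, total
--                                     in product((0, 1), (0, 1), (0, 1), range(74))
--                                     if (has2 and has7) or total==72)
--
--     return reduce(lambda a, b: (a + b) % MOD, (dp[c] for c in criteria))
-- ===== SOURCE B (Python) =====
-- MOD = 998244353
--
-- def solve(x):
--     v = str(x)
--     n = len(v)
--     memo = {}
--
--     def rec(i, less, has2, has7, total):
--         if i == n: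
--             return 1 if (has2 and has7) or total == 72 else 0
--         key = (i, less, has2, has7, total)
--         if key in memo:
--             return memo[key]
--         max_d = 9 if less else int(v[i])
--         acc = 0
--         for d in range(max_d + 1):
--             acc = (acc + rec(i + 1, less or d < max_d, has2 or d == 2,
--                              has7 or d == 7, min(73, total + d))) % MOD
--         memo[key] = acc
--         return acc
--
--     return rec(0, False, False, False, 0)
-- ===== Notes on version B (the rewrite author's own statement) =====
-- stated objective: alternative
-- what changed: Replaces A's bottom-up defaultdict tabulation that sweeps every (position, less, has2, has7, total) cell of the full product space with a top-down memoized recursion (manual dict memo) from the most significant digit, which only visits reachable states and needs no final reduce over acceptance criteria.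
import Mathlib
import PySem

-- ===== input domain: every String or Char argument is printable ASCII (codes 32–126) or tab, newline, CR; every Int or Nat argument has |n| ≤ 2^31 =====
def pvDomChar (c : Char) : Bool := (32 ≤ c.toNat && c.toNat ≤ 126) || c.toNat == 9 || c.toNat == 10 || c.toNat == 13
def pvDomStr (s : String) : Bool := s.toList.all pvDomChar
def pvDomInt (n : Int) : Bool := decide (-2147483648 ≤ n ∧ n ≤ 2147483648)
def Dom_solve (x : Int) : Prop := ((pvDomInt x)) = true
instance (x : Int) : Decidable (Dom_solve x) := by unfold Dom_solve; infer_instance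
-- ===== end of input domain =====

-- B replaces A's bottom-up defaultdict tabulation over all (position, state) pairs by a top-down
-- memoized recursion from the most significant digit (objective: alternative decomposition).

-- ===== PORT A =====
-- int(v[i]): exact under Pre_solve (0 ≤ x), where the index is in range and the char is a digit;
-- for negative x Python raises ValueError on the '-' sign (excluded by Pre_solve).
def pvIntAt (v : List Char) (i : Int) : Int :=
  (PySem.Int.ofChars? [(PySem.Chars.pyGet? v i).getD ' ']).getD 0

-- body of A's tabulation loop for one product element q = (i, less, has2, has7, total):
-- for d in range(max_d+1): dp[i+1, ...] += dp[i, ...]; dp[i+1, ...] %= MOD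
def solveLoopBody (v : List Char) (q : Nat × Bool × Bool × Bool × Int)
    (dp : Std.HashMap (Int × Bool × Bool × Bool × Int) Int) :
    Std.HashMap (Int × Bool × Bool × Bool × Int) Int :=
  let i := q.1; let less := q.2.1; let has2 := q.2.2.1; let has7 := q.2.2.2.1; let total := q.2.2.2.2
  let max_d := if less then 9 else pvIntAt v (i : Int)
  (PySem.List.pyRange 0 (max_d + 1) 1).foldl (fun dp d =>
    let key := ((i : Int) + 1, less || decide (d < max_d), has2 || decide (d = 2),
                has7 || decide (d = 7), min 73 (total + d))
    let dp1 := dp.insert key (dp.getD key 0 + dp.getD ((i : Int), less, has2, has7, total) 0)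
    dp1.insert key (dp1.getD key 0 % 998244353)) dp

def solve (x : Int) : Int :=
  let v := (PySem.Int.toStr x).toList
  let n := v.length
  -- defaultdict(int); its reads of missing keys return 0 (getD _ 0).  dp is only ever read by
  -- key lookup and never iterated, so a hash map models the Python dict exactly here
  let dp0 : Std.HashMap (Int × Bool × Bool × Bool × Int) Int :=
    (∅ : Std.HashMap (Int × Bool × Bool × Bool × Int) Int).insert (0, false, false, false, 0) 1
  -- product(range(n), (0,1), (0,1), (0,1), range(74)), one flat loop in lexicographic order;
  -- Python's 0/1 flags and the booleans produced by `or`/`<` coincide as dict keys (False == 0), modeled as Bool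
  let prod := (List.range n).flatMap (fun i =>
    [false, true].flatMap (fun less => [false, true].flatMap (fun has2 => [false, true].flatMap (fun has7 =>
      (PySem.List.pyRange 0 74 1).map (fun total => (i, less, has2, has7, total))))))
  let dp := prod.foldl (fun dp q => solveLoopBody v q dp) dp0
  let criteria := [false, true].flatMap (fun less => [false, true].flatMap (fun has2 =>
    [false, true].flatMap (fun has7 =>
      ((PySem.List.pyRange 0 74 1).filter (fun total => (has2 && has7) || decide (total = 72))).map
        (fun total => ((n : Int), less, has2, has7, total)))))
  -- reduce over a generator; criteria is nonempty (all total = 72 entries pass), so [] is unreachable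
  match criteria.map (fun c => dp.getD c 0) with
  | [] => 0
  | a :: rest => rest.foldl (fun a b => (a + b) % 998244353) a

-- ===== PORT B =====
-- rec(i, less, has2, has7, total) of Source B; structural fuel m = n - i (m = 0 ↔ i == n), memo threaded
def solveAltRec (v : List Char) :
    Nat → Int → Bool → Bool → Bool → Int → Std.HashMap (Int × Bool × Bool × Bool × Int) Int →
    Int × Std.HashMap (Int × Bool × Bool × Bool × Int) Int
  | 0, _, _, has2, has7, total, memo =>
      (if (has2 && has7) || decide (total = 72) then 1 else 0, memo)
  | m + 1, i, less, has2, has7, total, memo =>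
      match memo[((i, less, has2, has7, total) : Int × Bool × Bool × Bool × Int)]? with
      | some r => (r, memo)
      | none =>
          let max_d := if less then 9 else pvIntAt v i
          let p := (PySem.List.pyRange 0 (max_d + 1) 1).foldl
            (fun (p : Int × Std.HashMap (Int × Bool × Bool × Bool × Int) Int) d =>
              let q := solveAltRec v m (i + 1) (less || decide (d < max_d))
                (has2 || decide (d = 2)) (has7 || decide (d = 7)) (min 73 (total + d)) p.2
              ((p.1 + q.1) % 998244353, q.2)) (0, memo)
          (p.1, p.2.insert (i, less, has2, has7, total) p.1)

def solve_alt (x : Int) : Int :=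
  let v := (PySem.Int.toStr x).toList
  (solveAltRec v v.length 0 false false false 0 (∅ : Std.HashMap (Int × Bool × Bool × Bool × Int) Int)).1

-- ===== PRECONDITION & SPEC =====
-- Pre_solve excludes negative inputs, on which both A and Source B raise ValueError (int() of the sign character).
def Pre_solve (x : Int) : Prop := 0 ≤ x
instance (x : Int) : Decidable (Pre_solve x) := by unfold Pre_solve; infer_instance
def pvWitness_solve : Int := 2727

def Spec_solve (x : Int) (out : Int) : Prop := out = solve_alt x
instance (x : Int) (out : Int) : Decidable (Spec_solve x out) := by unfold Spec_solve; infer_instance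

-- ===== CLAIM (what is proved, stated in full; the proofs are below) =====
def Claim_equal_solve : Prop := ∀ (x : Int), Dom_solve x → Pre_solve x → Spec_solve x (solve x)

-- ===== LEMMAS AND PROOFS =====

-- proof-layer abbreviations and the mathematical description of the computation
abbrev pvS := Bool × Bool × Bool × Int
abbrev pvK := Int × Bool × Bool × Bool × Int
abbrev pvD := Std.HashMap pvK Int
abbrev pvZ := ZMod 998244353

def pvKey (j : Int) (s : pvS) : pvK := (j, s.1, s.2.1, s.2.2.1, s.2.2.2)

def pvStates : List pvS :=
  [false, true].flatMap (fun l => [false, true].flatMap (fun h2 => [false, true].flatMap (fun h7 =>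
    (PySem.List.pyRange 0 74 1).map (fun t => (l, h2, h7, t)))))

def pvMaxd (v : List Char) (i : Int) (less : Bool) : Int := if less then 9 else pvIntAt v i

def pvStep (md : Int) (s : pvS) (d : Int) : pvS :=
  (s.1 || decide (d < md), s.2.1 || decide (d = 2), s.2.2.1 || decide (d = 7), min 73 (s.2.2.2 + d))

-- the exact value of the top-down recursion, fuel m = number of remaining digits
def pvRec (v : List Char) : Nat → Int → pvS → Int
  | 0, _, s => if (s.2.1 && s.2.2.1) || decide (s.2.2.2 = 72) then 1 else 0
  | m + 1, i, s =>
      (PySem.List.pyRange 0 (pvMaxd v i s.1 + 1) 1).foldl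
        (fun acc d => (acc + pvRec v m (i + 1) (pvStep (pvMaxd v i s.1) s d)) % 998244353) 0

def pvSum (dp : pvD) (j : Int) (w : pvS → pvZ) : pvZ :=
  (pvStates.map (fun s => ((dp.getD (pvKey j s) 0 : Int) : pvZ) * w s)).sum

def pvDp0 : pvD := (∅ : pvD).insert (0, false, false, false, 0) 1

def pvIter (v : List Char) (j : Nat) : pvD :=
  (List.range j).foldl
    (fun dp i => pvStates.foldl (fun dp s => solveLoopBody v (i, s.1, s.2.1, s.2.2.1, s.2.2.2) dp) dp)
    pvDp0

def pvCriteria (n : Nat) : List pvK :=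
  [false, true].flatMap (fun less => [false, true].flatMap (fun has2 =>
    [false, true].flatMap (fun has7 =>
      ((PySem.List.pyRange 0 74 1).filter (fun total => (has2 && has7) || decide (total = 72))).map
        (fun total => ((n : Int), less, has2, has7, total)))))

def pvUpd (v : List Char) (i : Nat) (s : pvS) (dp : pvD) (d : Int) : pvD :=
  let md := pvMaxd v (i : Int) s.1
  let key := pvKey ((i : Int) + 1) (pvStep md s d)
  let dp1 := dp.insert key (dp.getD key 0 + dp.getD (pvKey (i : Int) s) 0)
  dp1.insert key (dp1.getD key 0 % 998244353)

def pvGood (v : List Char) (n : Nat) (memo : pvD) : Prop :=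
  ∀ (m : Nat) (l h2 h7 : Bool) (t : Int) (r : Int), m ≤ n →
    memo[((((n - m : Nat) : Int), l, h2, h7, t) : pvK)]? = some r →
    r = pvRec v m ((n - m : Nat) : Int) (l, h2, h7, t)

lemma pv_cast_mod (a : Int) : ((a % 998244353 : Int) : pvZ) = (a : pvZ) := by
  have h : ((998244353 : Int)) = ((998244353 : Nat) : Int) := by norm_num
  rw [h]; exact ZMod.intCast_mod a 998244353
lemma pv_foldl_mod_cast (ds : List Int) (f : Int → Int) : ∀ a : Int,
    (((ds.foldl (fun acc d => (acc + f d) % 998244353) a : Int)) : pvZ)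
      = (a : pvZ) + (ds.map (fun d => ((f d : Int) : pvZ))).sum := by
  induction ds with
  | nil => simp
  | cons d ds ih =>
    intro a
    simp only [List.foldl_cons, List.map_cons, List.sum_cons, ih, pv_cast_mod]
    push_cast
    ring
lemma pv_foldl_mod_range (ds : List Int) (f : Int → Int) : ∀ a : Int,
    0 ≤ a → a < 998244353 →
    0 ≤ ds.foldl (fun acc d => (acc + f d) % 998244353) a ∧
    ds.foldl (fun acc d => (acc + f d) % 998244353) a < 998244353 := by
  induction ds with
  | nil => exact fun a h1 h2 => ⟨h1, h2⟩
  | cons d ds ih =>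
    intro a _ _
    exact ih _ (Int.emod_nonneg _ (by norm_num)) (Int.emod_lt_of_pos _ (by norm_num))
set_option maxRecDepth 100000 in
set_option maxHeartbeats 1000000 in
lemma pvStates_nodup : pvStates.Nodup := by decide
lemma pvStates_mem (s : pvS) : s ∈ pvStates ↔ 0 ≤ s.2.2.2 ∧ s.2.2.2 < 74 := by
  rcases s with ⟨l, h2, h7, t⟩
  simp [pvStates, PySem.List.mem_pyRange_one]
  cases l <;> cases h2 <;> cases h7 <;> simp
lemma pvKey_inj {j j' : Int} {s s' : pvS} : pvKey j s = pvKey j' s' ↔ j = j' ∧ s = s' := by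
  rcases s with ⟨a, b, c, d⟩; rcases s' with ⟨a', b', c', d'⟩
  simp [pvKey, Prod.ext_iff]
lemma pvStep_mem (md : Int) (s : pvS) (d : Int) (hs : 0 ≤ s.2.2.2) (hd : 0 ≤ d) :
    pvStep md s d ∈ pvStates := by
  rw [pvStates_mem]
  have : (pvStep md s d).2.2.2 = min 73 (s.2.2.2 + d) := rfl
  rw [this]; omega
lemma pv_sum_single (l : List pvS) (hl : l.Nodup) (σ : pvS) (hσ : σ ∈ l) (f : pvS → pvZ) :
    (l.map (fun y => if y = σ then f y else 0)).sum = f σ := by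
  induction l with
  | nil => simp at hσ
  | cons a l ih =>
    rcases List.mem_cons.mp hσ with h | h
    · have hnotmem : σ ∉ l := h ▸ (List.nodup_cons.mp hl).1
      have hz : ∀ y ∈ l, (if y = σ then f y else 0) = 0 := by
        intro y hy
        have : y ≠ σ := fun e => hnotmem (e ▸ hy)
        simp [this]
      have : (l.map (fun y => if y = σ then f y else 0)).sum = 0 :=
        List.sum_eq_zero fun z hz' => by
          rcases List.mem_map.mp hz' with ⟨y, hy, rfl⟩; exact hz y hy
      simp [← h, this]
    · have hne : a ≠ σ := fun e => (List.nodup_cons.mp hl).1 (e ▸ h)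
      simp [hne, ih (List.nodup_cons.mp hl).2 h]
lemma pv_sum_update (l : List pvS) (hl : l.Nodup) (σ : pvS) (hσ : σ ∈ l) (f g : pvS → pvZ)
    (h : ∀ y ∈ l, y ≠ σ → g y = f y) : (l.map g).sum = (l.map f).sum + (g σ - f σ) := by
  induction l with
  | nil => simp at hσ
  | cons a l ih =>
    rcases List.mem_cons.mp hσ with rfl | hmem
    · have : ∀ y ∈ l, g y = f y := fun y hy =>
        h y (List.mem_cons_of_mem _ hy) (fun e => (List.nodup_cons.mp hl).1 (e ▸ hy))
      simp [List.map_congr_left this]; ring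
    · have hne : a ≠ σ := fun e => (List.nodup_cons.mp hl).1 (e ▸ hmem)
      have hrec := ih (List.nodup_cons.mp hl).2 hmem
        (fun y hy hyne => h y (List.mem_cons_of_mem _ hy) hyne)
      have ha : g a = f a := h a (by simp) hne
      simp [hrec, ha]; ring

lemma pv_filter_sum (l : List Int) (p : Int → Bool) (f : Int → pvZ) :
    ((l.filter p).map f).sum = (l.map (fun t => if p t then f t else 0)).sum := by
  induction l with
  | nil => simp
  | cons a l ih => by_cases h : p a <;> simp [h, ih]

lemma pv_foldl_flatMap {α β γ : Type} (l : List α) (g : α → List β) (f : γ → β → γ) (init : γ) :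
    (l.flatMap g).foldl f init = l.foldl (fun acc a => (g a).foldl f acc) init := by
  induction l generalizing init with
  | nil => rfl
  | cons a l ih => simp [List.flatMap_cons, List.foldl_append, ih]

lemma pvRec_range (v : List Char) (m : Nat) (i : Int) (s : pvS) :
    0 ≤ pvRec v m i s ∧ pvRec v m i s < 998244353 := by
  cases m with
  | zero => unfold pvRec; split <;> norm_num
  | succ m => exact pv_foldl_mod_range _ _ 0 le_rfl (by norm_num)

lemma pvRec_cast_succ (v : List Char) (m : Nat) (i : Int) (s : pvS) :
    ((pvRec v (m + 1) i s : Int) : pvZ)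
      = ((PySem.List.pyRange 0 (pvMaxd v i s.1 + 1) 1).map
          (fun d => ((pvRec v m (i + 1) (pvStep (pvMaxd v i s.1) s d) : Int) : pvZ))).sum := by
  have := pv_foldl_mod_cast (PySem.List.pyRange 0 (pvMaxd v i s.1 + 1) 1)
    (fun d => pvRec v m (i + 1) (pvStep (pvMaxd v i s.1) s d)) 0
  simpa [pvRec] using this


lemma pv_body_eq (v : List Char) (i : Nat) (s : pvS) (dp : pvD) :
    solveLoopBody v (i, s.1, s.2.1, s.2.2.1, s.2.2.2) dp
      = (PySem.List.pyRange 0 (pvMaxd v (i : Int) s.1 + 1) 1).foldl (pvUpd v i s) dp := rfl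

lemma pv_upd_getD (v : List Char) (i : Nat) (s : pvS) (dp : pvD) (d : Int) (q : pvK) :
    (pvUpd v i s dp d).getD q 0
      = if q = pvKey ((i : Int) + 1) (pvStep (pvMaxd v (i : Int) s.1) s d) then
          (dp.getD (pvKey ((i : Int) + 1) (pvStep (pvMaxd v (i : Int) s.1) s d)) 0
            + dp.getD (pvKey (i : Int) s) 0) % 998244353
        else dp.getD q 0 := by
  simp only [pvUpd, Std.HashMap.getD_insert, beq_iff_eq]
  split_ifs <;> simp_all

lemma pv_upd_contains (v : List Char) (i : Nat) (s : pvS) (dp : pvD) (d : Int) (q : pvK)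
    (h : (pvUpd v i s dp d).contains q) :
    dp.contains q ∨ q = pvKey ((i : Int) + 1) (pvStep (pvMaxd v (i : Int) s.1) s d) := by
  simp only [pvUpd, Std.HashMap.contains_insert] at h
  rcases Bool.or_eq_true_iff.mp h with h | h
  · exact Or.inr (Eq.symm (by simpa using h))
  · rcases Bool.or_eq_true_iff.mp h with h | h
    · exact Or.inr (Eq.symm (by simpa using h))
    · exact Or.inl h

lemma pv_upd_sum (v : List Char) (i : Nat) (s : pvS) (hs : 0 ≤ s.2.2.2) (dp : pvD) (d : Int)
    (hd : 0 ≤ d) (w : pvS → pvZ) :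
    pvSum (pvUpd v i s dp d) ((i : Int) + 1) w
      = pvSum dp ((i : Int) + 1) w
        + ((dp.getD (pvKey (i : Int) s) 0 : Int) : pvZ) * w (pvStep (pvMaxd v (i : Int) s.1) s d) := by
  have hupd := pv_sum_update pvStates pvStates_nodup (pvStep (pvMaxd v (i : Int) s.1) s d)
    (pvStep_mem _ _ _ hs hd)
    (fun s' => ((dp.getD (pvKey ((i : Int) + 1) s') 0 : Int) : pvZ) * w s')
    (fun s' => (((pvUpd v i s dp d).getD (pvKey ((i : Int) + 1) s') 0 : Int) : pvZ) * w s')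
    (by
      intro y hy hyne
      simp only [pv_upd_getD]
      rw [if_neg]
      intro h
      exact hyne (pvKey_inj.mp h).2)
  show (pvStates.map _).sum = _
  rw [hupd]
  show pvSum dp ((i : Int) + 1) w + _ = _
  simp only [pv_upd_getD, if_true]
  rw [pv_cast_mod]
  push_cast
  ring

lemma pv_upd_fold_props (v : List Char) (i : Nat) (s : pvS) (hs : 0 ≤ s.2.2.2) :
    ∀ (ds : List Int), (∀ d ∈ ds, 0 ≤ d) → ∀ (dp : pvD),
    (∀ q : pvK, q.1 ≠ (i : Int) + 1 → (ds.foldl (pvUpd v i s) dp).getD q 0 = dp.getD q 0) ∧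
    (∀ q : pvK, (ds.foldl (pvUpd v i s) dp).contains q → dp.contains q ∨ q.1 = (i : Int) + 1) ∧
    (∀ w : pvS → pvZ,
      pvSum (ds.foldl (pvUpd v i s) dp) ((i : Int) + 1) w
        = pvSum dp ((i : Int) + 1) w
          + ((dp.getD (pvKey (i : Int) s) 0 : Int) : pvZ)
            * (ds.map (fun d => w (pvStep (pvMaxd v (i : Int) s.1) s d))).sum) := by
  intro ds
  induction ds with
  | nil => exact fun _ dp => ⟨fun _ _ => rfl, fun q h => Or.inl h, fun w => by simp⟩
  | cons d ds ih =>
    intro hd dp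
    have hd0 : 0 ≤ d := hd d (by simp)
    have ihs := ih (fun d' hd' => hd d' (by simp [hd'])) (pvUpd v i s dp d)
    have hsrc : (pvUpd v i s dp d).getD (pvKey (i : Int) s) 0 = dp.getD (pvKey (i : Int) s) 0 := by
      rw [pv_upd_getD]
      have : ¬ (pvKey (i : Int) s = pvKey ((i : Int) + 1) (pvStep (pvMaxd v (i : Int) s.1) s d)) := by
        rw [pvKey_inj]; rintro ⟨h, -⟩; omega
      simp [this]
    refine ⟨?_, ?_, ?_⟩
    · intro q hq
      rw [List.foldl_cons, ihs.1 q hq, pv_upd_getD]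
      have : ¬ (q = pvKey ((i : Int) + 1) (pvStep (pvMaxd v (i : Int) s.1) s d)) := by
        intro h; exact hq (congrArg Prod.fst h)
      simp [this]
    · intro q hq
      rw [List.foldl_cons] at hq
      rcases ihs.2.1 q hq with h | h
      · rcases pv_upd_contains v i s dp d q h with h' | h'
        · exact Or.inl h'
        · exact Or.inr (congrArg Prod.fst h')
      · exact Or.inr h
    · intro w
      rw [List.foldl_cons, ihs.2.2 w, pv_upd_sum v i s hs dp d hd0 w, hsrc]
      simp only [List.map_cons, List.sum_cons]
      ring

lemma pv_body_props (v : List Char) (i : Nat) (s : pvS) (hs : 0 ≤ s.2.2.2) (dp : pvD) :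
    (∀ q : pvK, q.1 ≠ (i : Int) + 1 →
        (solveLoopBody v (i, s.1, s.2.1, s.2.2.1, s.2.2.2) dp).getD q 0 = dp.getD q 0) ∧
    (∀ q : pvK, (solveLoopBody v (i, s.1, s.2.1, s.2.2.1, s.2.2.2) dp).contains q →
        dp.contains q ∨ q.1 = (i : Int) + 1) ∧
    (∀ w : pvS → pvZ,
      pvSum (solveLoopBody v (i, s.1, s.2.1, s.2.2.1, s.2.2.2) dp) ((i : Int) + 1) w
        = pvSum dp ((i : Int) + 1) w
          + ((dp.getD (pvKey (i : Int) s) 0 : Int) : pvZ)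
            * ((PySem.List.pyRange 0 (pvMaxd v (i : Int) s.1 + 1) 1).map
                (fun d => w (pvStep (pvMaxd v (i : Int) s.1) s d))).sum) := by
  rw [pv_body_eq]
  exact pv_upd_fold_props v i s hs _
    (fun d hd => (PySem.List.mem_pyRange_one.mp hd).1) dp

lemma pv_layer_props (v : List Char) (i : Nat) (ss : List pvS) (hss : ∀ s ∈ ss, 0 ≤ s.2.2.2) :
    ∀ dp : pvD,
    (∀ q : pvK, q.1 ≠ (i : Int) + 1 →
      (ss.foldl (fun dp s => solveLoopBody v (i, s.1, s.2.1, s.2.2.1, s.2.2.2) dp) dp).getD q 0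
        = dp.getD q 0) ∧
    (∀ q : pvK,
      (ss.foldl (fun dp s => solveLoopBody v (i, s.1, s.2.1, s.2.2.1, s.2.2.2) dp) dp).contains q →
        dp.contains q ∨ q.1 = (i : Int) + 1) ∧
    (∀ w : pvS → pvZ,
      pvSum (ss.foldl (fun dp s => solveLoopBody v (i, s.1, s.2.1, s.2.2.1, s.2.2.2) dp) dp)
          ((i : Int) + 1) w
        = pvSum dp ((i : Int) + 1) w
          + (ss.map (fun s => ((dp.getD (pvKey (i : Int) s) 0 : Int) : pvZ)
              * ((PySem.List.pyRange 0 (pvMaxd v (i : Int) s.1 + 1) 1).map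
                  (fun d => w (pvStep (pvMaxd v (i : Int) s.1) s d))).sum)).sum) := by
  induction ss with
  | nil => exact fun dp => ⟨fun _ _ => rfl, fun q h => Or.inl h, fun w => by simp⟩
  | cons s ss ih =>
    intro dp
    have hs0 : 0 ≤ s.2.2.2 := hss s (by simp)
    have hbody := pv_body_props v i s hs0 dp
    have ihs := ih (fun s' hs' => hss s' (by simp [hs'])) (solveLoopBody v (i, s.1, s.2.1, s.2.2.1, s.2.2.2) dp)
    refine ⟨?_, ?_, ?_⟩
    · intro q hq
      rw [List.foldl_cons, ihs.1 q hq, hbody.1 q hq]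
    · intro q hq
      rw [List.foldl_cons] at hq
      rcases ihs.2.1 q hq with h | h
      · exact hbody.2.1 q h
      · exact Or.inr h
    · intro w
      rw [List.foldl_cons, ihs.2.2 w, hbody.2.2 w]
      simp only [List.map_cons, List.sum_cons]
      have : ∀ s' ∈ ss,
          (((solveLoopBody v (i, s.1, s.2.1, s.2.2.1, s.2.2.2) dp).getD (pvKey (i : Int) s') 0 : Int) : pvZ)
            * ((PySem.List.pyRange 0 (pvMaxd v (i : Int) s'.1 + 1) 1).map
                (fun d => w (pvStep (pvMaxd v (i : Int) s'.1) s' d))).sum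
          = ((dp.getD (pvKey (i : Int) s') 0 : Int) : pvZ)
            * ((PySem.List.pyRange 0 (pvMaxd v (i : Int) s'.1 + 1) 1).map
                (fun d => w (pvStep (pvMaxd v (i : Int) s'.1) s' d))).sum := by
        intro s' _
        rw [hbody.1 (pvKey (i : Int) s') (by simp [pvKey])]
      rw [List.map_congr_left this]
      ring

set_option maxRecDepth 10000 in
lemma pvIter_props (v : List Char) (n : Nat) : ∀ j, j ≤ n →
    (∀ q : pvK, (pvIter v j).contains q → q.1 ≤ (j : Int)) ∧
    pvSum (pvIter v j) (j : Int) (fun s => ((pvRec v (n - j) (j : Int) s : Int) : pvZ))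
      = ((pvRec v n 0 (false, false, false, 0) : Int) : pvZ) := by
  intro j
  induction j with
  | zero =>
    intro _
    constructor
    · intro q hq
      simp only [pvIter, List.range_zero, List.foldl_nil, pvDp0,
        Std.HashMap.contains_insert] at hq
      rcases Bool.or_eq_true_iff.mp hq with h | h
      · have : q = ((0 : Int), false, false, false, (0 : Int)) := Eq.symm (by simpa using h)
        simp [this]
      · simp [Std.HashMap.contains_empty] at h
    · show pvSum pvDp0 ((0 : Nat) : Int) _ = _
      have hgetD : ∀ s : pvS, pvDp0.getD (pvKey ((0 : Nat) : Int) s) 0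
          = if s = ((false, false, false, (0 : Int)) : pvS) then 1 else 0 := by
        intro s
        simp only [pvDp0, Std.HashMap.getD_insert, Std.HashMap.getD_empty, beq_iff_eq]
        by_cases h : s = ((false, false, false, (0 : Int)) : pvS)
        · subst h; simp [pvKey]
        · rw [if_neg, if_neg h]
          intro hk
          have : ((0 : Nat) : Int) = 0 ∧ s = ((false, false, false, (0 : Int)) : pvS) := by
            have := pvKey_inj (j := ((0 : Nat) : Int)) (j' := 0)
              (s := s) (s' := ((false, false, false, (0 : Int)) : pvS))
            exact this.mp hk.symm
          exact h this.2
      show (pvStates.map _).sum = _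
      have : (pvStates.map (fun s =>
            ((pvDp0.getD (pvKey ((0 : Nat) : Int) s) 0 : Int) : pvZ)
              * ((pvRec v (n - 0) ((0 : Nat) : Int) s : Int) : pvZ)))
          = pvStates.map (fun s => if s = ((false, false, false, (0 : Int)) : pvS) then
              ((pvRec v (n - 0) ((0 : Nat) : Int) s : Int) : pvZ) else 0) := by
        apply List.map_congr_left
        intro s _
        rw [hgetD s]
        by_cases h : s = ((false, false, false, (0 : Int)) : pvS) <;> simp [h]
      rw [this, pv_sum_single pvStates pvStates_nodup _ (by rw [pvStates_mem]; norm_num) _]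
      norm_num
  | succ j ihj =>
    intro hj
    have ih := ihj (by omega)
    have hlayer := pv_layer_props v j pvStates
      (fun s hs => ((pvStates_mem s).mp hs).1) (pvIter v j)
    have hiter : pvIter v (j + 1)
        = pvStates.foldl (fun dp s => solveLoopBody v (j, s.1, s.2.1, s.2.2.1, s.2.2.2) dp)
            (pvIter v j) := by
      show (List.range (j + 1)).foldl _ pvDp0
          = pvStates.foldl _ ((List.range j).foldl _ pvDp0)
      rw [List.range_succ, List.foldl_append, List.foldl_cons, List.foldl_nil]
    constructor
    · intro q hq
      rw [hiter] at hq
      rcases hlayer.2.1 q hq with h | h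
      · have := ih.1 q h; push_cast; omega
      · push_cast; omega
    · rw [hiter]
      have hcast : ((j + 1 : Nat) : Int) = (j : Int) + 1 := by push_cast; ring
      rw [show pvSum (pvStates.foldl (fun dp s => solveLoopBody v (j, s.1, s.2.1, s.2.2.1, s.2.2.2) dp) (pvIter v j)) ((j + 1 : Nat) : Int)
            (fun s => ((pvRec v (n - (j + 1)) ((j + 1 : Nat) : Int) s : Int) : pvZ))
          = pvSum (pvStates.foldl (fun dp s => solveLoopBody v (j, s.1, s.2.1, s.2.2.1, s.2.2.2) dp) ((pvIter v j))) ((j : Int) + 1)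
            (fun s => ((pvRec v (n - (j + 1)) ((j : Int) + 1) s : Int) : pvZ)) from by rw [hcast]]
      rw [hlayer.2.2]
      have hzero : pvSum (pvIter v j) ((j : Int) + 1)
          (fun s => ((pvRec v (n - (j + 1)) ((j : Int) + 1) s : Int) : pvZ)) = 0 := by
        apply List.sum_eq_zero
        intro z hz
        rcases List.mem_map.mp hz with ⟨s, _, rfl⟩
        have hnc : (pvIter v j).contains (pvKey ((j : Int) + 1) s) = false := by
          by_contra h
          have := ih.1 (pvKey ((j : Int) + 1) s) (by simpa using h)
          simp [pvKey] at this
        have hni : pvKey ((j : Int) + 1) s ∉ pvIter v j := by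
          rw [Std.HashMap.mem_iff_contains, hnc]; exact Bool.false_ne_true
        simp [Std.HashMap.getD_eq_fallback hni]
      rw [hzero, zero_add]
      have hterm : ∀ s ∈ pvStates,
          (((pvIter v j).getD (pvKey (j : Int) s) 0 : Int) : pvZ)
            * ((PySem.List.pyRange 0 (pvMaxd v (j : Int) s.1 + 1) 1).map
                (fun d => ((pvRec v (n - (j + 1)) ((j : Int) + 1) (pvStep (pvMaxd v (j : Int) s.1) s d) : Int) : pvZ))).sum
          = (((pvIter v j).getD (pvKey (j : Int) s) 0 : Int) : pvZ)
            * ((pvRec v (n - j) (j : Int) s : Int) : pvZ) := by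
        intro s _
        rw [show n - j = (n - (j + 1)) + 1 from by omega, pvRec_cast_succ]
      calc (pvStates.map (fun s => (((pvIter v j).getD (pvKey (j : Int) s) 0 : Int) : pvZ)
              * ((PySem.List.pyRange 0 (pvMaxd v (j : Int) s.1 + 1) 1).map
                  (fun d => ((pvRec v (n - (j + 1)) ((j : Int) + 1) (pvStep (pvMaxd v (j : Int) s.1) s d) : Int) : pvZ))).sum)).sum
          = (pvStates.map (fun s => (((pvIter v j).getD (pvKey (j : Int) s) 0 : Int) : pvZ)
              * ((pvRec v (n - j) (j : Int) s : Int) : pvZ))).sum := by rw [List.map_congr_left hterm]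
        _ = ((pvRec v n 0 (false, false, false, 0) : Int) : pvZ) := ih.2


lemma pvAltRec_correct (v : List Char) (n : Nat) : ∀ (m : Nat), m ≤ n →
    ∀ (l h2 h7 : Bool) (t : Int) (memo : pvD), pvGood v n memo →
    (solveAltRec v m (((n - m : Nat) : Int)) l h2 h7 t memo).1
        = pvRec v m (((n - m : Nat) : Int)) (l, h2, h7, t) ∧
    pvGood v n (solveAltRec v m (((n - m : Nat) : Int)) l h2 h7 t memo).2 := by
  intro m
  induction m with
  | zero =>
    intro _ l h2 h7 t memo hg
    constructor
    · rfl
    · exact hg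
  | succ m ih =>
    intro hm l h2 h7 t memo hg
    have hi : ((n - m : Nat) : Int) = ((n - (m + 1) : Nat) : Int) + 1 := by
      have : n - m = (n - (m + 1)) + 1 := by omega
      rw [this]; push_cast; ring
    set i : Int := ((n - (m + 1) : Nat) : Int) with hidef
    show (solveAltRec v (m + 1) i l h2 h7 t memo).1 = _ ∧ _
    rw [solveAltRec]
    cases hget : memo[((i, l, h2, h7, t) : pvK)]? with
    | some r =>
      have := hg (m + 1) l h2 h7 t r hm hget
      simp only [this]
      exact ⟨rfl, hg⟩
    | none =>
      simp only []
      set md := if l then 9 else pvIntAt v i with hmd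
      have hmd' : md = pvMaxd v i l := by cases l <;> simp [pvMaxd, hmd]
      -- fold correctness
      have bfold : ∀ (ds : List Int) (acc : Int) (memo' : pvD), pvGood v n memo' →
          (ds.foldl (fun (p : Int × pvD) d =>
              let q := solveAltRec v m (i + 1) (l || decide (d < md))
                (h2 || decide (d = 2)) (h7 || decide (d = 7)) (min 73 (t + d)) p.2
              ((p.1 + q.1) % 998244353, q.2)) (acc, memo')).1
            = ds.foldl (fun a d => (a + pvRec v m (i + 1) (pvStep md (l, h2, h7, t) d)) % 998244353) acc ∧
          pvGood v n (ds.foldl (fun (p : Int × pvD) d =>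
              let q := solveAltRec v m (i + 1) (l || decide (d < md))
                (h2 || decide (d = 2)) (h7 || decide (d = 7)) (min 73 (t + d)) p.2
              ((p.1 + q.1) % 998244353, q.2)) (acc, memo')).2 := by
        intro ds
        induction ds with
        | nil => exact fun acc memo' hg' => ⟨rfl, hg'⟩
        | cons d ds ihd =>
          intro acc memo' hg'
          have hcall := ih (by omega) (l || decide (d < md)) (h2 || decide (d = 2))
            (h7 || decide (d = 7)) (min 73 (t + d)) memo' hg'
          rw [hi] at hcall
          simp only [List.foldl_cons]
          have hrest := ihd ((acc + (solveAltRec v m (i + 1) (l || decide (d < md))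
                (h2 || decide (d = 2)) (h7 || decide (d = 7)) (min 73 (t + d)) memo').1) % 998244353)
            ((solveAltRec v m (i + 1) (l || decide (d < md))
                (h2 || decide (d = 2)) (h7 || decide (d = 7)) (min 73 (t + d)) memo').2) hcall.2
          refine ⟨?_, hrest.2⟩
          rw [hrest.1, hcall.1]
          rfl
      have hfold := bfold (PySem.List.pyRange 0 (md + 1) 1) 0 memo hg
      constructor
      · show (_ : Int × pvD).1 = _
        simp only [hfold.1]
        rw [pvRec]
        simp [hmd']
      · -- after the insert
        intro m' l' h2' h7' t' r' hm' hget'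
        by_cases hkey : (((n - m' : Nat) : Int), l', h2', h7', t') = ((i : Int), l, h2, h7, t)
        · -- same key: the inserted value
          have hik : ((n - m' : Nat) : Int) = i := congrArg Prod.fst hkey
          have hmm : m' = m + 1 := by
            have := hik; rw [hidef] at this
            omega
          obtain ⟨-, hl', hh2', hh7', ht'⟩ : True ∧ l' = l ∧ h2' = h2 ∧ h7' = h7 ∧ t' = t := by
            simp [Prod.ext_iff] at hkey; tauto
          subst hl'; subst hh2'; subst hh7'; subst ht'; subst hmm
          rw [hik] at hget' ⊢
          rw [Std.HashMap.getElem?_insert, if_pos (beq_iff_eq.mpr rfl)] at hget'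
          have : r' = _ := (Option.some.inj hget').symm
          rw [this, hfold.1, pvRec]
          simp [hmd']
        · rw [Std.HashMap.getElem?_insert,
            if_neg (fun h => hkey (beq_iff_eq.mp h).symm)] at hget'
          exact hfold.2 m' l' h2' h7' t' r' hm' hget'

-- the port's flat product fold is the layered iteration
lemma pv_dp_eq (v : List Char) (n : Nat) :
    (((List.range n).flatMap (fun i =>
      [false, true].flatMap (fun less => [false, true].flatMap (fun has2 => [false, true].flatMap (fun has7 =>
        (PySem.List.pyRange 0 74 1).map (fun total => (i, less, has2, has7, total))))))).foldl
      (fun dp q => solveLoopBody v q dp)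
      ((∅ : pvD).insert (0, false, false, false, 0) 1))
    = pvIter v n := by
  rw [pv_foldl_flatMap]
  show _ = (List.range n).foldl _ pvDp0
  apply PySem.List.foldl_congr_mem
  intro dp i _
  have hinner : ([false, true].flatMap (fun less => [false, true].flatMap (fun has2 =>
      [false, true].flatMap (fun has7 =>
        (PySem.List.pyRange 0 74 1).map (fun total => (i, less, has2, has7, total))))))
      = pvStates.map (fun s => (i, s.1, s.2.1, s.2.2.1, s.2.2.2)) := by
    simp [pvStates, List.map_map]
    rfl
  rw [hinner, List.foldl_map]

-- the reduce over criteria, cast to ZMod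
lemma pv_reduce_cast (xs : List Int) :
    (((match xs with
      | [] => (0 : Int)
      | a :: rest => rest.foldl (fun a b => (a + b) % 998244353) a) : Int) : pvZ)
      = (xs.map (fun b => ((b : Int) : pvZ))).sum := by
  cases xs with
  | nil => simp
  | cons a rest =>
    show ((rest.foldl (fun a b => (a + b) % 998244353) a : Int) : pvZ) = _
    have := pv_foldl_mod_cast rest (fun b => b) a
    simpa using this

lemma pv_criteria_sum (v : List Char) (dp : pvD) (n : Nat) :
    ((pvCriteria n).map (fun c => ((dp.getD c 0 : Int) : pvZ))).sum
      = pvSum dp (n : Int) (fun s => ((pvRec v 0 (n : Int) s : Int) : pvZ)) := by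
  have chunk : ∀ (l h2 h7 : Bool),
      ((((PySem.List.pyRange 0 74 1).filter (fun t => (h2 && h7) || decide (t = 72))).map
        (fun t => ((dp.getD ((n : Int), l, h2, h7, t) 0 : Int) : pvZ))).sum)
      = (((PySem.List.pyRange 0 74 1)).map
          (fun t => ((dp.getD ((n : Int), l, h2, h7, t) 0 : Int) : pvZ)
            * ((pvRec v 0 (n : Int) (l, h2, h7, t) : Int) : pvZ))).sum := by
    intro l h2 h7
    rw [pv_filter_sum]
    apply congrArg
    apply List.map_congr_left
    intro t _
    cases hcond : ((h2 && h7) || decide (t = 72) : Bool) with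
    | true => simp [hcond, pvRec]
    | false => simp [hcond, pvRec]
  simp only [pvCriteria, pvSum, pvStates, List.flatMap_cons, List.flatMap_nil, List.append_nil,
    List.map_append, List.sum_append, List.map_map, Function.comp_def, pvKey]
  rw [chunk false false false, chunk false false true, chunk false true false,
    chunk false true true, chunk true false false, chunk true false true,
    chunk true true false, chunk true true true]

lemma pv_solve_alt_eq (x : Int) :
    solve_alt x = pvRec (PySem.Int.toStr x).toList (PySem.Int.toStr x).toList.length 0
      (false, false, false, 0) := by
  have hempty : pvGood (PySem.Int.toStr x).toList (PySem.Int.toStr x).toList.length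
      (∅ : pvD) := by
    intro m l h2 h7 t r _ hget
    rw [Std.HashMap.getElem?_empty] at hget
    exact absurd hget (by simp)
  have h := (pvAltRec_correct (PySem.Int.toStr x).toList (PySem.Int.toStr x).toList.length
    (PySem.Int.toStr x).toList.length le_rfl false false false 0 (∅ : pvD) hempty).1
  rw [Nat.sub_self] at h
  exact h

lemma pv_solve_eq (x : Int) :
    solve x = (match (pvCriteria (PySem.Int.toStr x).toList.length).map
        (fun c => (pvIter (PySem.Int.toStr x).toList (PySem.Int.toStr x).toList.length).getD c 0) with
      | [] => (0 : Int)
      | a :: rest => rest.foldl (fun a b => (a + b) % 998244353) a) := by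
  show (match (pvCriteria (PySem.Int.toStr x).toList.length).map
        (fun c => ((((List.range (PySem.Int.toStr x).toList.length).flatMap (fun i =>
      [false, true].flatMap (fun less => [false, true].flatMap (fun has2 => [false, true].flatMap (fun has7 =>
        (PySem.List.pyRange 0 74 1).map (fun total => (i, less, has2, has7, total))))))).foldl
      (fun dp q => solveLoopBody (PySem.Int.toStr x).toList q dp)
      ((∅ : pvD).insert (0, false, false, false, 0) 1)).getD c 0)) with
      | [] => (0 : Int)
      | a :: rest => rest.foldl (fun a b => (a + b) % 998244353) a) = _
  simp only [pv_dp_eq]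

lemma pv_solve_cast (x : Int) :
    ((solve x : Int) : pvZ)
      = ((pvRec (PySem.Int.toStr x).toList (PySem.Int.toStr x).toList.length 0
          (false, false, false, 0) : Int) : pvZ) ∧
    0 ≤ solve x ∧ solve x < 998244353 := by
  set v := (PySem.Int.toStr x).toList with hv
  set n := v.length with hn
  obtain ⟨cr, hcr⟩ : ∃ cr, pvCriteria n
      = ((n : Int), false, false, false, 72) :: ((n : Int), false, false, true, 72) :: cr :=
    ⟨_, rfl⟩
  have hsolve := pv_solve_eq x
  rw [← hv, ← hn] at hsolve
  constructor
  · rw [hsolve, pv_reduce_cast, List.map_map]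
    have h1 := pv_criteria_sum v (pvIter v n) n
    rw [show ((fun b : Int => (b : pvZ)) ∘ fun c => (pvIter v n).getD c 0)
        = (fun c => (((pvIter v n).getD c 0 : Int) : pvZ)) from rfl]
    rw [h1]
    have h2 := (pvIter_props v n n le_rfl).2
    rw [Nat.sub_self] at h2
    exact h2
  · rw [hsolve, hcr]
    simp only [List.map_cons, List.foldl_cons]
    exact pv_foldl_mod_range _ (fun b => b) _ (Int.emod_nonneg _ (by norm_num))
      (Int.emod_lt_of_pos _ (by norm_num))

theorem pv_final (x : Int) : solve x = solve_alt x := by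
  have hA := pv_solve_cast x
  have hB := pv_solve_alt_eq x
  have hr := pvRec_range (PySem.Int.toStr x).toList (PySem.Int.toStr x).toList.length 0
    (false, false, false, 0)
  have hb1 : 0 ≤ solve_alt x := by rw [hB]; exact hr.1
  have hb2 : solve_alt x < 998244353 := by rw [hB]; exact hr.2
  have hcast : ((solve x : Int) : pvZ) = ((solve_alt x : Int) : pvZ) := by rw [hA.1, hB]
  have hmod : solve x % 998244353 = solve_alt x % 998244353 := by
    have := (ZMod.intCast_eq_intCast_iff _ _ _).mp hcast
    exact_mod_cast this
  rw [Int.emod_eq_of_lt hA.2.1 hA.2.2, Int.emod_eq_of_lt hb1 hb2] at hmod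
  exact hmod

-- ===== VERDICT (by name: the statement is the Claim_ definition above) =====
theorem solve_spec : Claim_equal_solve := by
  intro x _ _
  show solve x = solve_alt x
  exact pv_final x
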